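-- pv_equiv track=rewrite | github.com/oumaymaSghayer/problemsolving | problem16.py | regular
-- ===== SOURCE A (Python) =====
-- def regular(N):
--     i=1
--     j=1
--     l=[]
--
--     while i<N:
--         if 60 % i == 0:
--             l.append(i)
--         i+=1
--     return l
-- ===== SOURCE B (Python) =====
-- def regular(N):
--     divs = set()
--     for i in range(1, 8):  # 7 = int(60**0.5)
--         if 60 % i == 0:
--             divs.add(i)
--             divs.add(60 // i)
--     return sorted(d for d in divs if d < N)
-- ===== Notes on version B (the rewrite author's own statement) =====
-- stated objective: faster
-- what changed: Replaces the linear scan of every i < N with a sqrt(60)-bounded trial division that collects divisor pairs into a set, then filters to < N and sorts.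
import Mathlib
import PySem

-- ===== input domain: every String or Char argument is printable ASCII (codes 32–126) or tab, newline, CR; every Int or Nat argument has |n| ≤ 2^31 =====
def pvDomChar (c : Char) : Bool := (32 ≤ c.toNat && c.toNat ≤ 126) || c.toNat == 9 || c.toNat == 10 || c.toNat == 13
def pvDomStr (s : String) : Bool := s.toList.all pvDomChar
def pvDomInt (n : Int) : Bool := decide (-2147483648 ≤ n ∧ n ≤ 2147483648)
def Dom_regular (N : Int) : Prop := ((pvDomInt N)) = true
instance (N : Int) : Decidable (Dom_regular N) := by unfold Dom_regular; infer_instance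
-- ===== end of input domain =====

-- B replaces A's linear scan up to N with a √60-bounded divisor-pair pass, then filter-and-sort (measurably faster for large N).

-- ===== PORT A =====
-- A's counting while-loop (i=1; while i<N: …; i+=1) ported as a fold over pyRange 1 N;
-- the unused 'j=1' is dead code and is dropped.
def regular (N : Int) : List Int :=
  (PySem.List.pyRange 1 N 1).foldl
    (fun l i => if PySem.Int.mod 60 i = 0 then l ++ [i] else l) []

-- ===== PORT B =====
def regular_alt (N : Int) : List Int :=
  let divs : PySem.Set Int :=
    (PySem.List.pyRange 1 8 1).foldl
      (fun s i =>
        if PySem.Int.mod 60 i = 0 then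
          PySem.Set.add (PySem.Set.add s i) (PySem.Int.floordiv 60 i)
        else s)
      PySem.Set.empty
  PySem.List.sorted (divs.filter (fun d => d < N)) (fun x => x) false

-- ===== PRECONDITION & SPEC =====
def Spec_regular (N : Int) (out : List Int) : Prop := out = regular_alt N
instance (N : Int) (out : List Int) : Decidable (Spec_regular N out) := by unfold Spec_regular; infer_instance

-- ===== CLAIM (what is proved, stated in full; the proofs are below) =====
def Claim_equal_regular : Prop := ∀ (N : Int), Dom_regular N → Spec_regular N (regular N)

-- ===== LEMMAS AND PROOFS =====

-- the divisors of 60, ascending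
def pvD : List Int := [1, 2, 3, 4, 5, 6, 10, 12, 15, 20, 30, 60]

-- the literal set B builds, in insertion order
def pvL : List Int := [1, 60, 2, 30, 3, 20, 4, 15, 5, 12, 6, 10]

lemma regular_eq_filter (N : Int) :
    regular N = (PySem.List.pyRange 1 N 1).filter (fun i => decide (PySem.Int.mod 60 i = 0)) := by
  simp [regular, PySem.List.foldl_append_ite_eq_filter]

lemma regular_alt_eq (N : Int) :
    regular_alt N = PySem.List.sorted (pvL.filter (fun d => d < N)) (fun x => x) false := by
  have h : (PySem.List.pyRange 1 8 1).foldl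
      (fun s i =>
        if PySem.Int.mod 60 i = 0 then
          PySem.Set.add (PySem.Set.add s i) (PySem.Int.floordiv 60 i)
        else s)
      ([] : List Int) = pvL := by decide
  simp [regular_alt, h]

lemma mod_big {i : Int} (h : (61:Int) ≤ i) : PySem.Int.mod 60 i ≠ 0 := by
  rw [PySem.Int.mod_eq_emod_of_pos (by omega)]
  rw [Int.emod_eq_of_lt (by norm_num) (by omega)]
  norm_num

lemma small_case (N : Int) (h1 : (1:Int) < N) (h2 : N ≤ 61) : regular N = regular_alt N := by
  interval_cases N <;> decide

-- ===== VERDICT (by name: the statement is the Claim_ definition above) =====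
theorem regular_spec : Claim_equal_regular := by
  intro N _
  show regular N = regular_alt N
  rcases le_or_gt N 1 with hle | hgt
  · rw [regular_eq_filter, regular_alt_eq,
      PySem.List.pyRange_one_eq_nil (by omega)]
    have : pvL.filter (fun d => d < N) = [] := by
      rw [List.filter_eq_nil_iff]
      intro a ha
      fin_cases ha <;> simp <;> omega
    simp [this, PySem.List.sorted]
  · rcases le_or_gt N 61 with h61 | h61
    · exact small_case N hgt h61
    · rw [regular_eq_filter, regular_alt_eq]
      rw [PySem.List.pyRange_one_append 1 61 N (by omega) (by omega),
        List.filter_append]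
      have htail : (PySem.List.pyRange 61 N 1).filter
          (fun i => decide (PySem.Int.mod 60 i = 0)) = [] := by
        rw [List.filter_eq_nil_iff]
        intro a ha
        have := (PySem.List.mem_pyRange_one).1 ha
        simpa using mod_big (i := a) (by omega)
      have hall : pvL.filter (fun d => d < N) = pvL := by
        rw [List.filter_eq_self]
        intro a ha
        fin_cases ha <;> simp <;> omega
      rw [htail, hall]
      have hhead : (PySem.List.pyRange 1 61 1).filter
          (fun i => decide (PySem.Int.mod 60 i = 0)) = pvD := by decide
      have hsort : PySem.List.sorted pvL (fun x => x) false = pvD := by decide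
      rw [hhead, hsort, List.append_nil]
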